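-- pv_equiv track=rewrite | github.com/PetrPrazak/AdventOfCode | 2016/18/aoc2016_18.py | count_empty
-- ===== SOURCE A (Python) =====
-- TRAP = '^'
--
-- EMPTY = '.'
--
-- def new_tile(left, right):
--     """
--     Its left and center tiles are traps, but its right tile is not.
--     Its center and right tiles are traps, but its left tile is not.
--     Only its left tile is a trap.
--     Only its right tile is a trap.
--
--     Actually, the outcome doesn't rely on the center tile at all..."""
--     return TRAP if left != right else EMPTY
--
-- def count_empty(seed, rows):
--     row_len = len(seed)
--     result = seed.count(EMPTY)
--     line = list(seed)
--     for _ in range(1, rows):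
--         line = [EMPTY] + line + [EMPTY]
--         line = [new_tile(line[t-1], line[t+1]) for t in range(1, row_len+1)]
--         result += line.count(EMPTY)
--     return result
-- ===== SOURCE B (Python) =====
-- def count_empty(seed, rows):
--     line = seed
--     seen = {line: 0}
--     counts = [line.count('.')]
--     i = 1
--     while i < rows:
--         line = ''.join('^' if a != b else '.' for a, b in zip('.' + line, (line + '.')[1:]))
--         if line in seen:
--             start = seen[line]
--             period = i - start
--             cyc = counts[start:i]
--             q, r = divmod(rows - i, period)
--             return sum(counts) + q * sum(cyc) + sum(cyc[:r])
--         seen[line] = i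
--         counts.append(line.count('.'))
--         i += 1
--     return sum(counts)
-- ===== Notes on version B (the rewrite author's own statement) =====
-- stated objective: alternative
-- what changed: Replaces A's unconditional simulation of all rows generations by cycle detection: B memoises each row state in a dict and, at the first repeated state, sums the remaining rows arithmetically from the detected cycle (prefix sum + whole cycles + partial cycle).
import Mathlib
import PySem

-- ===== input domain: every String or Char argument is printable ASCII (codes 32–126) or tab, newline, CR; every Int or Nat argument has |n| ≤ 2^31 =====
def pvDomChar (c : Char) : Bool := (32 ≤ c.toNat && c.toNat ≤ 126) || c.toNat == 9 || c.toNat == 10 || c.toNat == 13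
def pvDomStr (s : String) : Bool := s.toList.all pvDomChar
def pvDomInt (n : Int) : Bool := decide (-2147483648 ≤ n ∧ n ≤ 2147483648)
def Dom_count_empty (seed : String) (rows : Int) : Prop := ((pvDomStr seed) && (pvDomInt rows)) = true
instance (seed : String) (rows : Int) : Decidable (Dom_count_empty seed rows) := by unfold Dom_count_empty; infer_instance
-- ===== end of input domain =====

-- B replaces A's unconditional row-by-row simulation of all `rows` generations by
-- cycle detection: it memoises each row's state in a dict and, at the first repeated
-- state, sums the remaining rows arithmetically from the detected cycle (a genuinely
-- different algorithm; the row counts it sums are the same, hence exactly A's value).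

-- ===== PORT A =====
def new_tile (left right : Char) : Char := if left != right then '^' else '.'

def count_empty (seed : String) (rows : Int) : Int :=
  let row_len : Int := PySem.Str.len seed
  let result : Int := (PySem.Str.count seed "." : Int)
  let line : List Char := seed.toList
  let st := (PySem.List.pyRange 1 rows 1).foldl
    (fun (st : List Char × Int) _ =>
      let line := '.' :: st.1 ++ ['.']
      let line := (PySem.List.pyRange 1 (row_len + 1) 1).map
        (fun t => new_tile (PySem.List.pyGetD line (t - 1) ' ')
                           (PySem.List.pyGetD line (t + 1) ' '))
      (line, st.2 + (PySem.List.count line '.' : Int)))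
    (line, result)
  st.2

-- ===== PORT B =====
-- ''.join('^' if a != b else '.' for a, b in zip('.' + line, (line + '.')[1:]))
def stepLine (line : List Char) : List Char :=
  (('.' :: line).zip (PySem.List.slice (line ++ ['.']) (some 1) none)).map
    (fun p => if p.1 != p.2 then '^' else '.')

-- the while loop; fuel = the remaining iteration bound rows - i, i kept as the Python int
def loopB (rows : Int) : Nat → List Char → Int → PySem.Dict (List Char) Int → List Int → Int
  | 0, _line, _i, _seen, counts => counts.sum
  | fuel+1, line, i, seen, counts =>
    let line' := stepLine line
    match seen.get? line' with
    | some start =>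
      let period := i - start
      let cyc := PySem.List.slice counts (some start) (some i)
      let q := PySem.Int.floordiv (rows - i) period
      let r := PySem.Int.mod (rows - i) period
      counts.sum + q * cyc.sum + (PySem.List.slice cyc none (some r)).sum
    | none =>
      loopB rows fuel line' (i + 1) (seen.insert line' i)
        (counts ++ [(PySem.Chars.count line' ['.'] : Int)])

def count_empty_alt (seed : String) (rows : Int) : Int :=
  let line := seed.toList
  let seen : PySem.Dict (List Char) Int := PySem.Dict.empty.insert line 0
  let counts : List Int := [(PySem.Chars.count line ['.'] : Int)]
  loopB rows (rows - 1).toNat line 1 seen counts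

-- ===== PRECONDITION & SPEC =====
def Spec_count_empty (seed : String) (rows : Int) (out : Int) : Prop := out = count_empty_alt seed rows
instance (seed : String) (rows : Int) (out : Int) : Decidable (Spec_count_empty seed rows out) := by unfold Spec_count_empty; infer_instance

-- ===== CLAIM (what is proved, stated in full; the proofs are below) =====
def Claim_equal_count_empty : Prop := ∀ (seed : String) (rows : Int), Dom_count_empty seed rows → Spec_count_empty seed rows (count_empty seed rows)

-- ===== LEMMAS AND PROOFS =====

lemma go_single (c : Char) : ∀ (l : List Char) (acc : Nat),
    PySem.Chars.count.go [c] l.length l acc = acc + l.count c := by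
  intro l
  induction l with
  | nil => intro acc; simp [PySem.Chars.count.go]
  | cons x t ih =>
    intro acc
    by_cases h : c = x
    · subst h
      have hpre : List.isPrefixOf [c] (c :: t) = true := by simp [List.isPrefixOf]
      simp [PySem.Chars.count.go, hpre, ih, List.count_cons]
      omega
    · have hpre : List.isPrefixOf [c] (x :: t) = false := by
        simp [List.isPrefixOf]; exact fun e => h e
      simp [PySem.Chars.count.go, hpre, ih, List.count_cons]
      exact fun e => h e.symm

/-- `s.count(c)` for a single character is the element count. -/
lemma count_single (c : Char) (l : List Char) : PySem.Chars.count l [c] = l.count c := by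
  simpa [PySem.Chars.count] using go_single c l 0

lemma length_stepLine (l : List Char) : (stepLine l).length = l.length := by
  simp [stepLine, PySem.List.slice_from_one]

lemma getElem_stepLine (l : List Char) (i : Nat) (hi : i < l.length) :
    (stepLine l)[i]'(by simp [length_stepLine, hi]) =
      if ('.' :: l).getD i ' ' != (l ++ ['.']).getD (i + 1) ' ' then '^' else '.' := by
  rw [List.getD_eq_getElem _ _ (by simp; omega), List.getD_eq_getElem _ _ (by simp; omega)]
  simp [stepLine, PySem.List.slice_from_one, List.getElem_zip, List.getElem_tail]

/-- A's comprehension rewritten as a `List.range` map of the padded-neighbour test. -/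
lemma lineStep_eq (n : Nat) (line : List Char) :
    (PySem.List.pyRange 1 ((n : Int) + 1) 1).map
      (fun t => new_tile (PySem.List.pyGetD ('.' :: line ++ ['.']) (t - 1) ' ')
                         (PySem.List.pyGetD ('.' :: line ++ ['.']) (t + 1) ' '))
    = (List.range n).map (fun i =>
        if ('.' :: line ++ ['.']).getD i ' ' != ('.' :: line ++ ['.']).getD (i + 2) ' '
        then '^' else '.') := by
  rw [PySem.List.pyRange_one]
  have hn : ((n : Int) + 1 - 1).toNat = n := by omega
  rw [hn, List.map_map]
  refine List.map_congr_left (fun i hi => ?_)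
  simp only [Function.comp]
  have h1 : (1 : Int) + (i : Int) - 1 = (i : Nat) := by ring
  have h2 : (1 : Int) + (i : Int) + 1 = ((i + 2 : Nat) : Int) := by push_cast; ring
  rw [h1, h2, PySem.List.pyGetD_natCast, PySem.List.pyGetD_natCast]
  rfl

/-- A's step over `range(1, n+1)` equals B's zip step on a line of length `n`. -/
lemma Astep_eq (l : List Char) (n : Nat) (h : l.length = n) :
    (PySem.List.pyRange 1 ((n : Int) + 1) 1).map
      (fun t => new_tile (PySem.List.pyGetD ('.' :: l ++ ['.']) (t - 1) ' ')
                         (PySem.List.pyGetD ('.' :: l ++ ['.']) (t + 1) ' '))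
    = stepLine l := by
  rw [lineStep_eq n l]
  apply List.ext_getElem
  · simp [length_stepLine, h]
  · intro i hi1 hi2
    have hin : i < n := by simpa using hi1
    have hil : i < l.length := by omega
    rw [getElem_stepLine l i hil]
    simp only [List.getElem_map, List.getElem_range]
    have e1 : ('.' :: l ++ ['.']).getD i ' ' = ('.' :: l).getD i ' ' := by
      rw [show ('.' :: l ++ ['.']) = ('.' :: l) ++ ['.'] from rfl,
        List.getD_append _ _ _ _ (by simp; omega)]
    have e2 : ('.' :: l ++ ['.']).getD (i + 2) ' ' = (l ++ ['.']).getD (i + 1) ' ' := by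
      simp
    rw [e1, e2]

/-- Row `k` of the automaton. -/
def iterL (s0 : List Char) (k : Nat) : List Char := stepLine^[k] s0

/-- Number of '.' in row `k`, as an Int. -/
def cnt (s0 : List Char) (k : Nat) : Int := (PySem.Chars.count (iterL s0 k) ['.'] : Int)

lemma iterL_succ (s0 : List Char) (k : Nat) : iterL s0 (k + 1) = stepLine (iterL s0 k) := by
  simp [iterL, Function.iterate_succ_apply']

lemma length_iterL (s0 : List Char) (k : Nat) : (iterL s0 k).length = s0.length := by
  induction k with
  | zero => rfl
  | succ k ih => rw [iterL_succ, length_stepLine, ih]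

/-- A's loop: each pass advances the row and adds its count. -/
lemma foldA (s0 : List Char) (n : Nat) (hn : s0.length = n) (L : List Int) :
    ∀ (k : Nat) (acc : Int),
    (L.foldl
      (fun (st : List Char × Int) _ =>
        let line := '.' :: st.1 ++ ['.']
        let line := (PySem.List.pyRange 1 ((n : Int) + 1) 1).map
          (fun t => new_tile (PySem.List.pyGetD line (t - 1) ' ')
                             (PySem.List.pyGetD line (t + 1) ' '))
        (line, st.2 + (PySem.List.count line '.' : Int)))
      (iterL s0 k, acc)).2
    = acc + ((List.range L.length).map (fun t => cnt s0 (k + 1 + t))).sum := by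
  induction L with
  | nil => intro k acc; simp
  | cons x L ih =>
    intro k acc
    rw [List.foldl_cons]
    simp only
    rw [Astep_eq (iterL s0 k) n (by rw [length_iterL, hn]), ← iterL_succ]
    rw [ih (k + 1) _]
    have hc : (PySem.List.count (iterL s0 (k + 1)) '.' : Int) = cnt s0 (k + 1) := by
      unfold cnt
      rw [count_single, PySem.List.count_eq]
    rw [hc]
    rw [List.length_cons, List.range_succ_eq_map]
    simp only [List.map_cons, List.map_map, List.sum_cons, Function.comp_def,
      Nat.succ_eq_add_one, Nat.add_zero]
    rw [List.map_congr_left (l := List.range L.length)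
      (f := fun x => cnt s0 (k + 1 + (x + 1))) (g := fun t => cnt s0 (k + 1 + 1 + t))
      (fun t _ => congrArg (cnt s0) (by omega))]
    ring

/-- Sum of a `p`-periodic function over an initial segment, in blocks. -/
lemma periodic_sum (g : Nat → Int) (p : Nat) (hper : ∀ d, g (d + p) = g d) :
    ∀ (q r : Nat),
    ((List.range (q * p + r)).map g).sum
      = (q : Int) * ((List.range p).map g).sum + ((List.range r).map g).sum := by
  intro q
  induction q with
  | zero => intro r; simp
  | succ q ih =>
    intro r
    have hsplit : (q + 1) * p + r = p + (q * p + r) := by ring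
    rw [hsplit, List.range_add, List.map_append, List.sum_append, List.map_map]
    have hmap : (List.range (q * p + r)).map (g ∘ (p + ·)) = (List.range (q * p + r)).map g :=
      List.map_congr_left (fun t _ => by
        show g (p + t) = g t
        rw [show p + t = t + p by omega, hper])
    rw [hmap, ih r]
    push_cast
    ring

/-- B's loop, under its invariants, sums the counts of all `rows` rows. -/
lemma loopB_eq (s0 : List Char) (rows : Int) :
    ∀ (fuel : Nat) (i : Nat) (seen : PySem.Dict (List Char) Int) (counts : List Int),
    1 ≤ i → (i : Int) + (fuel : Int) = rows →
    counts = (List.range i).map (cnt s0) →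
    (∀ j, j < i → seen.get? (iterL s0 j) = some (j : Int)) →
    (∀ l v, seen.get? l = some v → ∃ j, j < i ∧ l = iterL s0 j ∧ v = (j : Int)) →
    loopB rows fuel (iterL s0 (i - 1)) (i : Int) seen counts
      = ((List.range rows.toNat).map (cnt s0)).sum := by
  intro fuel
  induction fuel with
  | zero =>
    intro i seen counts hi hfi hcounts _ _
    have hri : rows.toNat = i := by omega
    simp [loopB, hcounts, hri]
  | succ fuel ih =>
    intro i seen counts hi hfi hcounts hfwd hinv
    have hstep : stepLine (iterL s0 (i - 1)) = iterL s0 i := by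
      rw [← iterL_succ, Nat.sub_add_cancel hi]
    rw [loopB, hstep]
    cases hget : seen.get? (iterL s0 i) with
    | none =>
      simp only
      have hrec := ih (i + 1) (seen.insert (iterL s0 i) (i : Int))
        (counts ++ [(PySem.Chars.count (iterL s0 i) ['.'] : Int)])
        (by omega) (by push_cast; omega)
        (by rw [hcounts, List.range_succ, List.map_append]; rfl)
        (by
          intro j hj
          rcases Nat.lt_succ_iff_lt_or_eq.mp hj with hj' | rfl
          · have hne : iterL s0 j ≠ iterL s0 i := by
              intro he
              rw [← he, hfwd j hj'] at hget
              simp at hget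
            rw [PySem.Dict.get?_insert_of_ne seen ((i : Nat) : Int) hne, hfwd j hj']
          · exact PySem.Dict.get?_insert_self _ _ _)
        (by
          intro l v hv
          rw [PySem.Dict.get?_insert] at hv
          by_cases hle : l = iterL s0 i
          · rw [if_pos hle] at hv
            exact ⟨i, by omega, hle, by injection hv with h; exact h.symm⟩
          · rw [if_neg hle] at hv
            obtain ⟨j, hj, hl, hv⟩ := hinv l v hv
            exact ⟨j, by omega, hl, hv⟩)
      rw [show (i + 1) - 1 = i from rfl] at hrec
      rw [show ((i + 1 : Nat) : Int) = (i : Int) + 1 by push_cast; ring] at hrec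
      exact hrec
    | some start =>
      simp only
      obtain ⟨j, hj, hl, rfl⟩ := hinv _ _ hget
      set p : Nat := i - j with hp
      have hppos : 0 < p := by omega
      have hij : i = j + p := by omega
      have hIter : ∀ d, iterL s0 (i + d) = iterL s0 (j + d) := by
        intro d
        unfold iterL
        rw [Nat.add_comm i d, Nat.add_comm j d, Function.iterate_add_apply,
          Function.iterate_add_apply]
        exact congrArg _ hl
      have hcntP : ∀ d, cnt s0 (i + d) = cnt s0 (j + d) := by
        intro d; unfold cnt; rw [hIter d]
      set g : Nat → Int := fun t => cnt s0 (j + t) with hg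
      have hper : ∀ d, g (d + p) = g d := by
        intro d
        show cnt s0 (j + (d + p)) = cnt s0 (j + d)
        rw [show j + (d + p) = i + d by omega, hcntP d]
      set R : Nat := fuel + 1 with hRdef
      have hR : rows - (i : Int) = (R : Int) := by push_cast; omega
      have hrows : rows.toNat = i + R := by omega
      have hperiod : (i : Int) - (j : Int) = (p : Int) := by push_cast; omega
      have hcyc : PySem.List.slice counts (some (j : Int)) (some (i : Int))
          = (List.range p).map g := by
        rw [hcounts, PySem.List.slice_natCast]
        rw [hij, List.range_add, List.map_append, List.map_map]
        rw [List.drop_left' (by simp), show j + p - j = p by omega]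
        rw [List.take_of_length_le (by simp)]
        rfl
      rw [hcyc, hperiod, hR, PySem.Int.floordiv_natCast, PySem.Int.mod_natCast]
      rw [PySem.List.slice_to_natCast, ← List.map_take, List.take_range,
        Nat.min_eq_left (Nat.le_of_lt (Nat.mod_lt _ hppos))]
      rw [hcounts, hrows, List.range_add, List.map_append, List.sum_append, List.map_map]
      have hmap2 : (List.range R).map (cnt s0 ∘ (i + ·)) = (List.range R).map g :=
        List.map_congr_left (fun t _ => hcntP t)
      rw [hmap2]
      rw [show R = (R / p) * p + R % p by rw [Nat.div_add_mod' R p]]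
      rw [periodic_sum g p hper (R / p) (R % p)]
      rw [show (R / p) * p + R % p = R by rw [Nat.div_add_mod' R p]]
      push_cast
      ring

-- ===== VERDICT (by name: the statement is the Claim_ definition above) =====
theorem count_empty_spec : Claim_equal_count_empty := by
  intro seed rows _
  show count_empty seed rows = count_empty_alt seed rows
  unfold count_empty count_empty_alt
  simp only [PySem.Str.len_eq]
  have hc0 : (PySem.Str.count seed "." : Int) = cnt seed.toList 0 := by
    unfold cnt iterL
    simp only [Function.iterate_zero, id_eq]
    rw [PySem.Str.count_eq]
    rfl
  rw [hc0]
  by_cases hrows : rows ≤ 1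
  · rw [PySem.List.pyRange_one_eq_nil hrows, show (rows - 1).toNat = 0 by omega]
    simp [loopB]
    unfold cnt iterL
    simp
  · push_neg at hrows
    have hA := foldA seed.toList seed.toList.length rfl (PySem.List.pyRange 1 rows 1) 0
      (cnt seed.toList 0)
    rw [show iterL seed.toList 0 = seed.toList from rfl] at hA
    rw [hA, PySem.List.length_pyRange_one]
    have hB := loopB_eq seed.toList rows (rows - 1).toNat 1
      (PySem.Dict.empty.insert seed.toList 0)
      [(PySem.Chars.count seed.toList ['.'] : Int)]
      (by omega) (by omega)
      (by simp [List.range_succ]; rfl)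
      (by
        intro j hj
        interval_cases j
        exact PySem.Dict.get?_insert_self _ _ _)
      (by
        intro l v hv
        rw [PySem.Dict.get?_insert] at hv
        by_cases hle : l = seed.toList
        · rw [if_pos hle] at hv
          exact ⟨0, by omega, hle, by injection hv with h; exact h.symm⟩
        · rw [if_neg hle] at hv
          rw [PySem.Dict.get?_empty] at hv
          simp at hv)
    rw [show iterL seed.toList (1 - 1) = seed.toList from rfl] at hB
    rw [show ((1 : Nat) : Int) = 1 by norm_cast] at hB
    rw [hB]
    rw [show rows.toNat = 1 + (rows - 1).toNat by omega]
    rw [List.range_add, List.map_append, List.sum_append, List.map_map]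
    simp only [List.range_one, List.map_cons, List.map_nil, List.sum_cons, List.sum_nil,
      Function.comp_def]
    ring
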